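-- pv_equiv track=rewrite | github.com/QBAgit/PYT_PRZYKLADOWE | answers.py | revers_sentence
-- ===== SOURCE A (Python) =====
-- def upFirstChar(word):
--     out = ""
--     for i in range(0,len(word)):
--         if i==0:
--             mychar = word[0].upper()
--         else:
--             mychar = word[i].lower()
--         out+=mychar
--     return out
--
-- def revers_sentence(text):
--
--     newtext = ""
--     #Split by space
--     L_text = text.split(" ")
--     #Reverse sentence
--     L_rev_text = L_text[::-1]
--
--     for word in range(0,len(L_rev_text)):
--         #Reverse single word
--         rev_word = L_rev_text[word][::-1]
--         #Upper First char
--         new_word = upFirstChar(rev_word)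
--
--         #Create new sentence
--         newtext += new_word
--         # Spaces only inside the sentance
--         if (word<len(L_rev_text)-1):
--             newtext += " "
--
--     return newtext
-- ===== SOURCE B (Python) =====
-- def revers_sentence(text):
--     # Reversing the whole string reverses both the word order and each word
--     # (split/join on a single space preserve the empty-token structure).
--     rev = text[::-1]
--     return " ".join(w[:1].upper() + w[1:].lower() for w in rev.split(" "))
-- ===== Notes on version B (the rewrite author's own statement) =====
-- stated objective: idiomatic
-- what changed: B reverses the whole string once and capitalizes each space-separated token of the reversal via slicing (w[:1].upper() + w[1:].lower()), replacing A's index loop that reverses every word separately and uppercases it with a per-character += loop.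
import Mathlib
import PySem

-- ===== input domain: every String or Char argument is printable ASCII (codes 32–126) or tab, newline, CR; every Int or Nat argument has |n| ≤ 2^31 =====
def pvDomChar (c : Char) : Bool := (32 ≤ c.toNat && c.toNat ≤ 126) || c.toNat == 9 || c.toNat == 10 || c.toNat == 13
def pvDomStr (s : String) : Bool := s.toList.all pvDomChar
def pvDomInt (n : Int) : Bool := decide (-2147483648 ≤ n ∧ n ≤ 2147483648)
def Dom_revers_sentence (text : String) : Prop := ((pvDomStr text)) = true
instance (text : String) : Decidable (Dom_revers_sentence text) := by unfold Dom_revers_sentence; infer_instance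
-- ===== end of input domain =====

-- B reverses the whole string once and capitalizes each space-separated token of the
-- reversal, instead of A's index loop that reverses each word and uppercases it char by char (idiomatic).


-- ===== PORT A =====
-- out = ""; for i in range(0,len(word)): out += word[0].upper() if i==0 else word[i].lower()
def upFirstChar (word : List Char) : List Char :=
  (PySem.List.pyRange 0 (PySem.List.len word)).foldl
    (fun out i =>
      out ++
        (if i == 0 then
          (match PySem.List.pyGet? word 0 with
            | some c => [PySem.Chars.upperChar c]
            | none => [])
        else
          (match PySem.List.pyGet? word i with
            | some c => [PySem.Chars.lowerChar c]
            | none => [])))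
    []

def revers_sentence (text : String) : String :=
  let L_text := PySem.Chars.splitOn text.toList [' ']
  let L_rev_text := (PySem.List.slice? L_text none none (-1)).getD []   -- L_text[::-1]
  let newtext :=
    (PySem.List.pyRange 0 (PySem.List.len L_rev_text)).foldl
      (fun newtext w =>
        let word := (PySem.List.pyGet? L_rev_text w).getD []            -- L_rev_text[word]
        let rev_word := (PySem.List.slice? word none none (-1)).getD [] -- word[::-1]
        let new_word := upFirstChar rev_word
        (newtext ++ new_word) ++
          (if w < PySem.List.len L_rev_text - 1 then [' '] else []))
      []
  String.ofList newtext

-- ===== PORT B =====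
-- w[:1].upper() + w[1:].lower()
def capFirst (w : List Char) : List Char :=
  (PySem.List.slice w none (some 1)).map PySem.Chars.upperChar
    ++ (PySem.List.slice w (some 1) none).map PySem.Chars.lowerChar

def revers_sentence_alt (text : String) : String :=
  let rev := (PySem.List.slice? text.toList none none (-1)).getD []     -- text[::-1]
  let words := PySem.Chars.splitOn rev [' ']
  String.ofList (PySem.Chars.join [' '] (words.map capFirst))

-- ===== PRECONDITION & SPEC =====
def Spec_revers_sentence (text : String) (out : String) : Prop := out = revers_sentence_alt text
instance (text : String) (out : String) : Decidable (Spec_revers_sentence text out) := by unfold Spec_revers_sentence; infer_instance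

-- ===== CLAIM (what is proved, stated in full; the proofs are below) =====
def Claim_equal_revers_sentence : Prop := ∀ (text : String), Dom_revers_sentence text → Spec_revers_sentence text (revers_sentence text)

-- ===== LEMMAS AND PROOFS =====

-- Simple structural model of s.split(" ") (single-space separator).
def splitSp : List Char → List (List Char)
  | [] => [[]]
  | c :: rest => if c = ' ' then [] :: splitSp rest else (splitSp rest).modifyHead (c :: ·)

theorem splitSp_ne_nil : ∀ (l : List Char), splitSp l ≠ []
  | [] => by simp [splitSp]
  | c :: rest => by
    simp only [splitSp]
    split_ifs
    · simp
    · cases hS : splitSp rest with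
      | nil => exact absurd hS (splitSp_ne_nil rest)
      | cons w ws => simp [List.modifyHead]

theorem modifyHead_append_ne {α : Type} (f : α → α) (l t : List α) (h : l ≠ []) :
    (l ++ t).modifyHead f = l.modifyHead f ++ t := by
  cases l with
  | nil => exact absurd rfl h
  | cons a as => simp [List.modifyHead]

theorem go_spec (fuel : Nat) (l cur : List Char) (acc : List (List Char))
    (h : l.length ≤ fuel) :
    PySem.Chars.splitOn.go [' '] fuel l cur acc
      = acc.reverse ++ (splitSp l).modifyHead (cur.reverse ++ ·) := by
  induction fuel generalizing l cur acc with
  | zero =>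
    have : l = [] := by cases l <;> simp_all
    subst this
    simp [PySem.Chars.splitOn.go, splitSp, List.modifyHead]
  | succ n ih =>
    cases l with
    | nil => simp [PySem.Chars.splitOn.go, splitSp, List.modifyHead]
    | cons c rest =>
      have hstep : PySem.Chars.splitOn.go [' '] (n+1) (c::rest) cur acc =
          if [' '].isPrefixOf (c::rest) then
            PySem.Chars.splitOn.go [' '] n (List.drop 1 (c::rest)) [] (cur.reverse :: acc)
          else PySem.Chars.splitOn.go [' '] n rest (c :: cur) acc := by
        simp [PySem.Chars.splitOn.go]
      rw [hstep]
      have hlen : rest.length ≤ n := by simpa using h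
      by_cases hc : c = ' '
      · subst hc
        simp only [List.isPrefixOf, BEq.rfl, Bool.true_and, if_pos, List.drop_succ_cons,
          List.drop_zero]
        rw [ih _ _ _ hlen]
        simp only [splitSp]
        cases splitSp rest <;> simp [List.modifyHead]
      · have hpre : [' '].isPrefixOf (c::rest) = false := by
          simp [List.isPrefixOf]
          intro h'; exact absurd h'.symm hc
        rw [if_neg (by simp [hpre])]
        rw [ih _ _ _ hlen]
        have hne := splitSp_ne_nil rest
        simp only [splitSp, if_neg hc]
        cases hS : splitSp rest with
        | nil => exact absurd hS hne
        | cons w ws => simp [List.modifyHead]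

theorem splitOn_eq_splitSp (s : List Char) :
    PySem.Chars.splitOn s [' '] = splitSp s := by
  show PySem.Chars.splitOn.go [' '] (s.length + 1) s [] [] = splitSp s
  rw [go_spec _ _ _ _ (by omega)]
  cases h : splitSp s with
  | nil => exact absurd h (splitSp_ne_nil s)
  | cons w ws => simp [List.modifyHead]

theorem splitSp_append_space (ys : List Char) :
    splitSp (ys ++ [' ']) = splitSp ys ++ [[]] := by
  induction ys with
  | nil => simp [splitSp]
  | cons c rest ih =>
    by_cases hc : c = ' '
    · subst hc; simp [splitSp, ih]
    · simp only [List.cons_append, splitSp, if_neg hc, ih]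
      rw [modifyHead_append_ne _ _ _ (splitSp_ne_nil rest)]

theorem mh_swap (f g : List Char → List Char) (w b : List Char) (t : List (List Char)) :
    ((List.modifyHead f ((b :: t) ++ [w])).reverse).modifyHead g
      = (List.modifyHead f ((b :: t) ++ [g w])).reverse := by
  simp [List.modifyHead, List.reverse_append]

theorem splitSp_append_char (ys : List Char) (c : Char) (hc : c ≠ ' ') :
    splitSp (ys ++ [c]) = ((splitSp ys).reverse.modifyHead (· ++ [c])).reverse := by
  induction ys with
  | nil => simp [splitSp, if_neg hc, List.modifyHead]
  | cons c' rest ih =>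
    by_cases hc' : c' = ' '
    · subst hc'
      simp only [List.cons_append, splitSp, if_true, ih, List.reverse_cons]
      rw [modifyHead_append_ne _ _ _ (by simp [splitSp_ne_nil rest])]
      simp
    · simp only [List.cons_append, splitSp, if_neg hc', ih]
      cases hS : splitSp rest with
      | nil => exact absurd hS (splitSp_ne_nil rest)
      | cons w ws =>
        cases ws with
        | nil => simp [List.modifyHead]
        | cons w2 ws2 =>
          cases hR : (w2 :: ws2).reverse with
          | nil => simp at hR
          | cons b t =>
            rw [List.reverse_cons (a := w), hR]
            have h2 : (List.modifyHead (c' :: ·) (w :: w2 :: ws2)).reverse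
                = (b :: t) ++ [c' :: w] := by
              simp [List.modifyHead, List.reverse_cons, hR]
            rw [h2]
            exact mh_swap _ _ _ _ _

theorem splitSp_reverse (l : List Char) :
    splitSp l.reverse = ((splitSp l).map List.reverse).reverse := by
  induction l with
  | nil => simp [splitSp]
  | cons c rest ih =>
    by_cases hc : c = ' '
    · subst hc
      simp only [List.reverse_cons, splitSp_append_space, ih, splitSp, if_true]
      simp
    · simp only [List.reverse_cons, splitSp_append_char _ _ hc, ih, splitSp, if_neg hc]
      cases hS : splitSp rest with
      | nil => exact absurd hS (splitSp_ne_nil rest)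
      | cons w ws => simp [List.modifyHead]

-- the common "capitalize" semantics
def upFront : List Char → List Char
  | [] => []
  | c :: cs => PySem.Chars.upperChar c :: cs.map PySem.Chars.lowerChar

theorem capFirst_eq (v : List Char) : capFirst v = upFront v := by
  cases v with
  | nil => simp [capFirst, upFront, PySem.List.slice]
  | cons c cs =>
    simp [capFirst, upFront, PySem.List.slice, PySem.List.clampIdx]

theorem tailSeg (cs full : List Char) (a : Nat) (hd : full.drop a = cs) (ha : 1 ≤ a) :
    (PySem.List.pyRange (a : Int) ((full.length : Nat) : Int)).flatMap
      (fun (i : Int) =>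
        (if i == 0 then
          (match PySem.List.pyGet? full 0 with
            | some c => [PySem.Chars.upperChar c]
            | none => [])
        else
          (match PySem.List.pyGet? full i with
            | some c => [PySem.Chars.lowerChar c]
            | none => [])))
      = cs.map PySem.Chars.lowerChar := by
  induction cs generalizing a with
  | nil =>
    have hle : full.length ≤ a := by
      by_contra h
      have := congrArg List.length hd
      simp [List.length_drop] at this
      omega
    rw [PySem.List.pyRange_one_eq_nil (a := (a : Int)) (b := ((full.length : Nat) : Int))
      (by exact_mod_cast hle)]
    simp
  | cons c cs' ih =>
    have hlt : a < full.length := by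
      have := congrArg List.length hd
      simp [List.length_drop] at this
      omega
    rw [PySem.List.pyRange_one_cons (a := (a : Int)) (b := ((full.length : Nat) : Int))
      (by exact_mod_cast hlt)]
    have hget : PySem.List.pyGet? full (a : Int) = some c := by
      rw [PySem.List.pyGet?_natCast]
      have : (full.drop a)[0]? = some c := by rw [hd]; rfl
      rwa [List.getElem?_drop, Nat.add_zero] at this
    have hne : ((a : Int) == 0) = false := by
      simp
      omega
    have hd' : full.drop (a+1) = cs' := by
      have := congrArg List.tail hd
      simpa [List.tail_drop] using this
    have hih := ih (a+1) hd' (by omega)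
    push_cast at hih
    simp only [List.flatMap_cons, hne, Bool.false_eq_true, if_false, hget]
    rw [hih]
    rfl

theorem upFirstChar_eq (v : List Char) : upFirstChar v = upFront v := by
  unfold upFirstChar
  rw [PySem.List.foldl_append_eq_flatMap]
  cases v with
  | nil => simp [upFront, PySem.List.len, PySem.List.pyRange]
  | cons c cs =>
    have hlen : PySem.List.len (c :: cs) = (((c :: cs).length : Nat) : Int) := by
      simp [PySem.List.len]
    rw [hlen, PySem.List.pyRange_one_cons (by simp)]
    have hget0 : PySem.List.pyGet? (c :: cs) 0 = some c := by
      simp [PySem.List.pyGet?, PySem.List.pyIdx?]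
    have h0 : ((0 : Int) == 0) = true := rfl
    have hih := tailSeg cs (c :: cs) 1 (by simp) (le_refl 1)
    push_cast at hih
    simp only [hget0] at hih
    simp only [List.flatMap_cons, h0, if_true, hget0, List.nil_append]
    rw [show (0 : Int) + 1 = 1 by norm_num, hih]
    simp [upFront]

theorem joinSeg (ws full : List (List Char)) (f : List Char → List Char) (a : Nat)
    (hd : full.drop a = ws) :
    (PySem.List.pyRange (a : Int) ((full.length : Nat) : Int)).flatMap
      (fun (i : Int) =>
        f ((PySem.List.pyGet? full i).getD []) ++
          (if i < ((full.length : Nat) : Int) - 1 then [' '] else []))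
      = List.intercalate [' '] (ws.map f) := by
  induction ws generalizing a with
  | nil =>
    have hle : full.length ≤ a := by
      by_contra h
      have := congrArg List.length hd
      simp [List.length_drop] at this
      omega
    rw [PySem.List.pyRange_one_eq_nil (a := (a : Int)) (b := ((full.length : Nat) : Int))
      (by exact_mod_cast hle)]
    simp [List.intercalate]
  | cons w rest ih =>
    have hlt : a < full.length := by
      have := congrArg List.length hd
      simp [List.length_drop] at this
      omega
    rw [PySem.List.pyRange_one_cons (a := (a : Int)) (b := ((full.length : Nat) : Int))
      (by exact_mod_cast hlt)]
    have hget : PySem.List.pyGet? full (a : Int) = some w := by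
      rw [PySem.List.pyGet?_natCast]
      have : (full.drop a)[0]? = some w := by rw [hd]; rfl
      rwa [List.getElem?_drop, Nat.add_zero] at this
    have hd' : full.drop (a+1) = rest := by
      have := congrArg List.tail hd
      simpa [List.tail_drop] using this
    cases rest with
    | nil =>
      have hlen : full.length = a + 1 := by
        have h1 := congrArg List.length hd
        simp [List.length_drop] at h1
        omega
      have hcond : ¬ ((a : Int) < ((full.length : Nat) : Int) - 1) := by
        rw [hlen]; push_cast; omega
      rw [PySem.List.pyRange_one_eq_nil (by rw [hlen]; push_cast; omega)]
      simp [hget, hcond, List.intercalate]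
    | cons r rs =>
      have hlt2 : a + 1 < full.length := by
        have h1 := congrArg List.length hd'
        simp [List.length_drop] at h1
        omega
      have hcond : (a : Int) < ((full.length : Nat) : Int) - 1 := by push_cast; omega
      have hih := ih (a+1) hd'
      push_cast at hih ⊢
      simp only [List.flatMap_cons, hget, Option.getD_some, if_pos hcond]
      rw [hih]
      simp [List.intercalate]

theorem revers_sentence_eq (text : String) :
    revers_sentence text
      = String.ofList (List.intercalate [' ']
          (((splitSp text.toList).reverse).map (fun w => upFront w.reverse))) := by
  unfold revers_sentence
  simp only [PySem.List.slice?_none_none_neg_one, Option.getD_some, splitOn_eq_splitSp]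
  have hfold :
      ∀ (L : List (List Char)),
        (PySem.List.pyRange 0 (PySem.List.len L)).foldl
          (fun newtext w =>
            (newtext ++ upFirstChar ((PySem.List.pyGet? L w).getD []).reverse) ++
              (if w < PySem.List.len L - 1 then [' '] else []))
          []
        = List.intercalate [' '] (L.map (fun w => upFront w.reverse)) := by
    intro L
    have hshape :
        (fun (newtext : List Char) (w : Int) =>
            (newtext ++ upFirstChar ((PySem.List.pyGet? L w).getD []).reverse) ++
              (if w < PySem.List.len L - 1 then [' '] else []))
        = fun (newtext : List Char) (w : Int) => newtext ++
            ((fun v => upFront v.reverse) ((PySem.List.pyGet? L w).getD []) ++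
              (if w < ((L.length : Nat) : Int) - 1 then [' '] else [])) := by
      funext newtext w
      simp [upFirstChar_eq, List.append_assoc, PySem.List.len]
    have hlen : PySem.List.len L = ((L.length : Nat) : Int) := by simp [PySem.List.len]
    rw [hshape, hlen, show ((0 : Int)) = ((0 : Nat) : Int) by norm_num,
      PySem.List.foldl_append_eq_flatMap]
    simpa using joinSeg L L (fun v => upFront v.reverse) 0 (by simp)
  rw [hfold]

theorem revers_sentence_alt_eq (text : String) :
    revers_sentence_alt text
      = String.ofList (List.intercalate [' ']
          (((splitSp text.toList).reverse).map (fun w => upFront w.reverse))) := by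
  unfold revers_sentence_alt
  simp only [PySem.List.slice?_none_none_neg_one, Option.getD_some, splitOn_eq_splitSp,
    splitSp_reverse, PySem.Chars.join]
  congr 1
  congr 1
  rw [List.map_reverse, List.map_map, List.map_reverse]
  congr 1
  simp [Function.comp, capFirst_eq]

-- ===== VERDICT (by name: the statement is the Claim_ definition above) =====
theorem revers_sentence_spec : Claim_equal_revers_sentence := by
  intro text _
  show revers_sentence text = revers_sentence_alt text
  rw [revers_sentence_eq, revers_sentence_alt_eq]
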